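-- pv_equiv track=rewrite | github.com/European-XFEL/EXtra | src/extra/components/detector_motors.py | guess_device_id
-- ===== SOURCE A (Python) =====
-- def guess_device_id(mangled_id, underscores=2):
--     """Tries to guess original id from mangled id."""
--     device_id = ''
--     for c in mangled_id:
--         u = c.upper()
--         if underscores > 0 and c == u:
--             device_id += '_'
--             underscores -= 1
--         device_id += u
--     return device_id
-- ===== SOURCE B (Python) =====
-- def guess_device_id(mangled_id, underscores=2):
--     """Tries to guess original id from mangled id."""
--     # Pass 1: index the first `underscores` positions holding an already-uppercase char.
--     positions = set()
--     for i, c in enumerate(mangled_id):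
--         if len(positions) >= underscores:
--             break
--         if c == c.upper():
--             positions.add(i)
--     # Pass 2: rebuild from the uppercased string, inserting '_' at indexed positions.
--     parts = []
--     for i, c in enumerate(mangled_id.upper()):
--         if i in positions:
--             parts.append('_')
--         parts.append(c)
--     return ''.join(parts)
-- ===== Notes on version B (the rewrite author's own statement) =====
-- stated objective: alternative
-- what changed: Replaces A's single stateful pass with a decrementing counter by an index-building pass (collect the first k uppercase-stable positions into a set) followed by a separate reconstruction pass over the uppercased string that inserts an underscore before each indexed position.
import Mathlib
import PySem

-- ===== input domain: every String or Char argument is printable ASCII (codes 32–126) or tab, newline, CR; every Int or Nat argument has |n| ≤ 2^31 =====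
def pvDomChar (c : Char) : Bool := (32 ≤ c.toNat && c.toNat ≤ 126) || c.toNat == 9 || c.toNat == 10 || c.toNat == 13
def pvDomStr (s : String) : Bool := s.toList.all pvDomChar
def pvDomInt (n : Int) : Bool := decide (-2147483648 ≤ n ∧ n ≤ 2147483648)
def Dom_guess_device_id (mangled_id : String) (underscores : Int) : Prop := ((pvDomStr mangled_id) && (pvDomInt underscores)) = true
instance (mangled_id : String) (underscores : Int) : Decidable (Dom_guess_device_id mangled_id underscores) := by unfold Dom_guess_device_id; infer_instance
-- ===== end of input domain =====

-- B replaces A's single counter-driven pass by an index-building pass plus a separate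
-- reconstruction pass (alternative decomposition, same O(n) cost).

-- ===== PORT A =====
-- A: one pass; state = (built string, remaining underscore budget).
-- loop body of A (the Python for-body, one step)
def guessAStep (st : List Char × Int) (c : Char) : List Char × Int :=
  let u := PySem.Chars.upperChar c
  let st := if st.2 > 0 && c == u then (st.1 ++ ['_'], st.2 - 1) else st
  (st.1 ++ [u], st.2)

def guess_device_id (mangled_id : String) (underscores : Int) : String :=
  let r := mangled_id.toList.foldl guessAStep ([], underscores)
  String.ofList r.1

-- ===== PORT B =====
-- B pass 1: the for-loop with break, as a recursion carrying (index, set) state.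
def guessPosLoop (cs : List Char) (i : Int) (pos : PySem.Set Int) (underscores : Int) : PySem.Set Int :=
  match cs with
  | [] => pos
  | c :: rest =>
      if (pos.length : Int) ≥ underscores then pos
      else if c == PySem.Chars.upperChar c then
        guessPosLoop rest (i + 1) (PySem.Set.add pos i) underscores
      else guessPosLoop rest (i + 1) pos underscores

-- loop body of B's second pass (append '_' at indexed positions, then the char)
def guessBStep (pos : PySem.Set Int) (acc : List Char) (p : Int × Char) : List Char :=
  (if PySem.Set.contains pos p.1 then acc ++ ['_'] else acc) ++ [p.2]

def guess_device_id_alt (mangled_id : String) (underscores : Int) : String :=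
  let pos := guessPosLoop mangled_id.toList 0 PySem.Set.empty underscores
  let parts := (PySem.List.enumerate (PySem.Chars.upper mangled_id.toList) 0).foldl
    (guessBStep pos) []
  String.ofList parts

-- ===== PRECONDITION & SPEC =====
def Spec_guess_device_id (mangled_id : String) (underscores : Int) (out : String) : Prop := out = guess_device_id_alt mangled_id underscores
instance (mangled_id : String) (underscores : Int) (out : String) : Decidable (Spec_guess_device_id mangled_id underscores out) := by unfold Spec_guess_device_id; infer_instance

-- ===== CLAIM (what is proved, stated in full; the proofs are below) =====
def Claim_equal_guess_device_id : Prop := ∀ (mangled_id : String) (underscores : Int), Dom_guess_device_id mangled_id underscores → Spec_guess_device_id mangled_id underscores (guess_device_id mangled_id underscores)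

-- ===== LEMMAS AND PROOFS =====

-- Pure form of A's loop.
def gA : List Char → Int → List Char
  | [], _ => []
  | c :: rest, u =>
      let uc := PySem.Chars.upperChar c
      if u > 0 && c == uc then '_' :: uc :: gA rest (u - 1) else uc :: gA rest u

theorem guessA_foldl (cs : List Char) (acc : List Char) (u : Int) :
    (cs.foldl guessAStep (acc, u)).1 = acc ++ gA cs u := by
  induction cs generalizing acc u with
  | nil => simp [gA]
  | cons c rest ih =>
      rw [List.foldl_cons]
      by_cases h : u > 0 && c == PySem.Chars.upperChar c
      · have hs : guessAStep (acc, u) c =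
            (acc ++ ['_', PySem.Chars.upperChar c], u - 1) := by
          simp [guessAStep, h]
        rw [hs, ih]
        simp [gA, h]
      · have hs : guessAStep (acc, u) c = (acc ++ [PySem.Chars.upperChar c], u) := by
          simp only [guessAStep]
          rw [if_neg h]
        rw [hs, ih]
        simp [gA, h]

-- Pure form of B's first pass: remaining budget k, next index i.
def pB : List Char → Int → Int → List Int
  | [], _, _ => []
  | c :: rest, i, k =>
      if k ≤ 0 then []
      else if c == PySem.Chars.upperChar c then i :: pB rest (i + 1) (k - 1)
      else pB rest (i + 1) k

theorem pB_mem_ge (cs : List Char) (i k : Int) (j : Int) (h : j ∈ pB cs i k) : i ≤ j := by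
  induction cs generalizing i k with
  | nil => simp [pB] at h
  | cons c rest ih =>
      simp only [pB] at h
      split at h
      · simp at h
      · split at h
        · rcases List.mem_cons.1 h with h | h
          · omega
          · have := ih (i + 1) (k - 1) h; omega
        · have := ih (i + 1) k h; omega

theorem guessPosLoop_eq (cs : List Char) (i : Int) (pre : List Int) (u : Int)
    (hpre : ∀ j ∈ pre, j < i) :
    guessPosLoop cs i pre u = pre ++ pB cs i (u - pre.length) := by
  induction cs generalizing i pre with
  | nil => simp [guessPosLoop, pB]
  | cons c rest ih =>
      simp only [guessPosLoop, pB]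
      by_cases hb : (pre.length : Int) ≥ u
      · have hk : u - (pre.length : Int) ≤ 0 := by omega
        simp [hb, hk]
      · have hk : ¬ (u - (pre.length : Int) ≤ 0) := by omega
        by_cases hc : c == PySem.Chars.upperChar c
        · have hnm : i ∉ pre := fun h => absurd (hpre i h) (by omega)
          have hadd : PySem.Set.add pre i = pre ++ [i] := PySem.Set.add_of_not_mem hnm
          have hpre' : ∀ j ∈ pre ++ [i], j < i + 1 := by
            intro j hj
            rcases List.mem_append.1 hj with h | h
            · exact lt_trans (hpre j h) (by omega)
            · simp at h; omega
          have hl : u - ((pre ++ [i]).length : Int) = u - pre.length - 1 := by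
            simp; omega
          simp only [hb, hk, hc, if_false, if_true, hadd, ih (i + 1) (pre ++ [i]) hpre', hl]
          simp
        · have hpre' : ∀ j ∈ pre, j < i + 1 := fun j hj => lt_trans (hpre j hj) (by omega)
          simp only [hb, hk, hc, if_false, ih (i + 1) pre hpre']
          simp

-- Pure form of B's second pass, enumerating from index i.
def emitFrom : List Char → Int → List Int → List Char
  | [], _, _ => []
  | c :: rest, i, pos =>
      (if PySem.Set.contains pos i then ['_'] else []) ++
        PySem.Chars.upperChar c :: emitFrom rest (i + 1) pos

theorem emitFrom_eq_gA (cs : List Char) (i k : Int) (pre : List Int)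
    (hpre : ∀ j ∈ pre, j < i) :
    emitFrom cs i (pre ++ pB cs i k) = gA cs k := by
  induction cs generalizing i k pre with
  | nil => simp [emitFrom, gA]
  | cons c rest ih =>
      simp only [emitFrom, gA, pB]
      by_cases hk : k ≤ 0
      · have hg : ¬ ((decide (k > 0) && (c == PySem.Chars.upperChar c)) = true) := by
          simp; intro h; omega
        have hnm : PySem.Set.contains (pre ++ ([] : List Int)) i = false := by
          simp
          intro h; exact absurd (hpre i h) (by omega)
        have hrest : (pre ++ ([] : List Int)) = pre ++ pB rest (i + 1) k := by
          cases rest <;> simp [pB, hk]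
        simp only [hk, if_true, hnm, Bool.false_eq_true, if_false, hg, List.nil_append]
        rw [hrest, ih (i + 1) k pre (fun j hj => lt_trans (hpre j hj) (by omega))]
      · by_cases hc : c == PySem.Chars.upperChar c
        · have hg : (decide (k > 0) && (c == PySem.Chars.upperChar c)) = true := by
            simp at hc ⊢; exact ⟨by omega, hc⟩
          have hm : PySem.Set.contains (pre ++ i :: pB rest (i + 1) (k - 1)) i = true := by
            simp
          have hre : pre ++ i :: pB rest (i + 1) (k - 1)
              = (pre ++ [i]) ++ pB rest (i + 1) (k - 1) := by simp
          have hpre' : ∀ j ∈ pre ++ [i], j < i + 1 := by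
            intro j hj
            rcases List.mem_append.1 hj with h | h
            · exact lt_trans (hpre j h) (by omega)
            · simp at h; omega
          simp only [hk, if_false, hc, if_true, hm, Bool.and_true, decide_eq_true (show k > 0 by omega)]
          rw [hre, ih (i + 1) (k - 1) (pre ++ [i]) hpre']
          simp
        · have hg : ¬ ((decide (k > 0) && (c == PySem.Chars.upperChar c)) = true) := by
            simp at hc ⊢; intro _; exact hc
          have hnm : PySem.Set.contains (pre ++ pB rest (i + 1) k) i = false := by
            simp
            constructor
            · intro h; exact absurd (hpre i h) (by omega)
            · intro h; have := pB_mem_ge rest (i + 1) k i h; omega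
          simp only [hk, if_false, hc, hnm, Bool.false_eq_true, List.nil_append]
          rw [ih (i + 1) k pre (fun j hj => lt_trans (hpre j hj) (by omega))]
          simp

-- B's actual second pass equals emitFrom.
theorem enumerate_fold_emit (cs : List Char) (i : Int) (pos : List Int) (acc : List Char) :
    (PySem.List.enumerate (PySem.Chars.upper cs) i).foldl (guessBStep pos) acc
    = acc ++ emitFrom cs i pos := by
  induction cs generalizing i acc with
  | nil => simp [PySem.Chars.upper, PySem.List.enumerate_nil, emitFrom]
  | cons c rest ih =>
      have hu : PySem.Chars.upper (c :: rest) = PySem.Chars.upperChar c :: PySem.Chars.upper rest := by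
        simp [PySem.Chars.upper]
      rw [hu, PySem.List.enumerate_cons, List.foldl_cons, ih, emitFrom]
      by_cases h : i ∈ pos
      · simp [guessBStep, h]
      · simp [guessBStep, h]

-- ===== VERDICT (by name: the statement is the Claim_ definition above) =====
theorem guess_device_id_spec : Claim_equal_guess_device_id := by
  intro s u _
  unfold Spec_guess_device_id
  simp only [guess_device_id, guess_device_id_alt]
  rw [guessA_foldl, enumerate_fold_emit]
  rw [guessPosLoop_eq s.toList 0 PySem.Set.empty u
    (by intro j hj; simp [PySem.Set.empty] at hj)]
  have he : (PySem.Set.empty : PySem.Set Int)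
        ++ pB s.toList 0 (u - ((PySem.Set.empty : PySem.Set Int).length : Int))
      = ([] : List Int) ++ pB s.toList 0 u := by
    simp [PySem.Set.empty]
  rw [he, emitFrom_eq_gA s.toList 0 u [] (by intro j hj; simp at hj)]
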